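-- pv_equiv track=rewrite | github.com/aegntic/cldcde | agent-zero/skills/bd-management/scripts/analyze.py | find_parallel_groups
-- ===== SOURCE A (Python) =====
-- from typing import Dict, List, Set, Optional
--
-- def find_parallel_groups(issues: List[Dict], dependency_map: Dict) -> List[List[Dict]]:
--     """Find groups of issues that can be executed in parallel"""
--     parallel_groups = []
--     remaining_issues = issues.copy()
--
--     while remaining_issues:
--         current_group = []
--         issues_to_remove = []
--
--         for issue in remaining_issues:
--             issue_id = issue.get('id')
--             # Check if this issue depends on any issue in current group
--             can_add = True
--             for other_issue in current_group:
--                 other_id = other_issue.get('id')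
--                 if issue_id in dependency_map.get(other_id, []):
--                     can_add = False
--                     break
--
--             if can_add:
--                 current_group.append(issue)
--                 issues_to_remove.append(issue)
--
--         if current_group:
--             parallel_groups.append(current_group)
--             for issue in issues_to_remove:
--                 remaining_issues.remove(issue)
--         else:
--             # No more parallel groups possible
--             break
--
--     return parallel_groups
-- ===== SOURCE B (Python) =====
-- from typing import Dict, List
--
-- def find_parallel_groups(issues: List[Dict], dependency_map: Dict) -> List[List[Dict]]:
--     """Find groups of issues that can be executed in parallel (single first-fit pass)."""
--     groups = []
--     for issue in issues:
--         issue_id = issue.get('id')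
--         for group in groups:
--             if all(issue_id not in dependency_map.get(member.get('id'), [])
--                    for member in group):
--                 group.append(issue)
--                 break
--         else:
--             groups.append([issue])
--     return groups
-- ===== Notes on version B (the rewrite author's own statement) =====
-- stated objective: simpler
-- what changed: Replaces A's repeated while-loop passes that sweep and remove from a shrinking remaining list with a single first-fit pass that places each issue into the earliest existing group whose members do not block it.
import Mathlib
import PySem

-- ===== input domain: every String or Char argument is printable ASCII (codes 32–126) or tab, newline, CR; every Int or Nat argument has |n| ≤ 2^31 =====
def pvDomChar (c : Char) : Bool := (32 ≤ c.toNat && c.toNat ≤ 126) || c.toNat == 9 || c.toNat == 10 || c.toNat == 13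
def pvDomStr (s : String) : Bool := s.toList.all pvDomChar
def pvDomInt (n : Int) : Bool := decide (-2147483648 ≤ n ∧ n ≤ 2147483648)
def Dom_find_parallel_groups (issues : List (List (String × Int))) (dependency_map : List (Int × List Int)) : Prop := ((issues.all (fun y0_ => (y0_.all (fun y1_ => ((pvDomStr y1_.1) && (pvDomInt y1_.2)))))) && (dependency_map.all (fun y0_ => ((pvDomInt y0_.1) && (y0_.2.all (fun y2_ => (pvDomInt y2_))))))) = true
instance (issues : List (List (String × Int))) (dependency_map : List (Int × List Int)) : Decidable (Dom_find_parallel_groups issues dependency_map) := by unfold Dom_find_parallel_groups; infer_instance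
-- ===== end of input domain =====

-- B replaces A's repeated sweep-and-remove passes over the remaining issues by a single
-- first-fit pass placing each issue into the earliest group that accepts it (simpler).

-- ===== PORT A =====
-- `issue_id in dependency_map.get(other_id, [])`: both ids may be None (missing 'id' key);
-- None never equals an int key or an int list element, hence the Option matches below.
def pvDeps (dependency_map : List (Int × List Int)) (oid : Option Int) : List Int :=
  match oid with
  | some k => (List.lookup k dependency_map).getD []
  | none => []

def pvBlocks (dependency_map : List (Int × List Int)) (other issue : List (String × Int)) : Bool :=
  match List.lookup "id" issue with
  | some i => (pvDeps dependency_map (List.lookup "id" other)).contains i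
  | none => false

-- body of A's `for issue in remaining_issues` loop: state = (current_group, issues_to_remove)
def pvPassA (dependency_map : List (Int × List Int))
    (st : List (List (String × Int)) × List (List (String × Int)))
    (issue : List (String × Int)) :
    List (List (String × Int)) × List (List (String × Int)) :=
  let can_add := st.1.all (fun other => ! pvBlocks dependency_map other issue)
  if can_add then (st.1 ++ [issue], st.2 ++ [issue]) else st

-- `remaining_issues.remove(issue)`; the element is always present here, so the getD is a totality guard only
def pvRemove (rem : List (List (String × Int))) (v : List (String × Int)) :
    List (List (String × Int)) :=
  (PySem.List.remove? rem v).getD rem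

-- A's `while remaining_issues` loop; fuel = number of issues (each iteration removes ≥ 1 issue)
def pvLoopA (dependency_map : List (Int × List Int)) :
    Nat → List (List (List (String × Int))) → List (List (String × Int)) →
    List (List (List (String × Int)))
  | 0, acc, _ => acc
  | fuel + 1, acc, rem =>
    if rem.isEmpty then acc
    else
      let p := rem.foldl (pvPassA dependency_map) ([], [])
      if p.1.isEmpty then acc
      else pvLoopA dependency_map fuel (acc ++ [p.1]) (p.2.foldl pvRemove rem)

def find_parallel_groups (issues : List (List (String × Int))) (dependency_map : List (Int × List Int)) : List (List (List (String × Int))) :=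
  pvLoopA dependency_map issues.length [] issues

-- ===== PORT B =====
-- place `issue` into the first group all of whose members do not block it, else open a new group
def pvPlace (dependency_map : List (Int × List Int)) :
    List (List (List (String × Int))) → List (String × Int) →
    List (List (List (String × Int)))
  | [], issue => [[issue]]
  | g :: gs, issue =>
    if g.all (fun m => ! pvBlocks dependency_map m issue) then (g ++ [issue]) :: gs
    else g :: pvPlace dependency_map gs issue

def find_parallel_groups_alt (issues : List (List (String × Int))) (dependency_map : List (Int × List Int)) : List (List (List (String × Int))) :=
  issues.foldl (pvPlace dependency_map) []

-- ===== PRECONDITION & SPEC =====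
def Spec_find_parallel_groups (issues : List (List (String × Int))) (dependency_map : List (Int × List Int)) (out : List (List (List (String × Int)))) : Prop := out = find_parallel_groups_alt issues dependency_map
instance (issues : List (List (String × Int))) (dependency_map : List (Int × List Int)) (out : List (List (List (String × Int)))) : Decidable (Spec_find_parallel_groups issues dependency_map out) := by unfold Spec_find_parallel_groups; infer_instance

-- ===== CLAIM (what is proved, stated in full; the proofs are below) =====
def Claim_equal_find_parallel_groups : Prop := ∀ (issues : List (List (String × Int))) (dependency_map : List (Int × List Int)), Dom_find_parallel_groups issues dependency_map → Spec_find_parallel_groups issues dependency_map (find_parallel_groups issues dependency_map)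

-- ===== LEMMAS AND PROOFS =====

-- selection/rejection split of one of A's passes, starting from group g
def pvSel (dependency_map : List (Int × List Int)) :
    List (List (String × Int)) → List (List (String × Int)) →
    List (List (String × Int)) × List (List (String × Int))
  | _, [] => ([], [])
  | g, x :: xs =>
    if g.all (fun m => ! pvBlocks dependency_map m x) then
      let p := pvSel dependency_map (g ++ [x]) xs
      (x :: p.1, p.2)
    else
      let p := pvSel dependency_map g xs
      (p.1, x :: p.2)

theorem pvPassA_foldl (dm : List (Int × List Int)) :
    ∀ (xs g itr : List (List (String × Int))),
      xs.foldl (pvPassA dm) (g, itr) = (g ++ (pvSel dm g xs).1, itr ++ (pvSel dm g xs).1) := by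
  intro xs
  induction xs with
  | nil => intro g itr; simp [pvSel]
  | cons x xs ih =>
    intro g itr
    simp only [List.foldl_cons, pvPassA, pvSel]
    by_cases h : g.all (fun m => ! pvBlocks dm m x) = true
    · simp [h, ih]
    · simp [h, ih]

theorem pvSel_mem (dm : List (Int × List Int)) :
    ∀ (xs g v : _), v ∈ (pvSel dm g xs).1 → g.all (fun m => ! pvBlocks dm m v) = true := by
  intro xs
  induction xs with
  | nil => intro g v hv; simp [pvSel] at hv
  | cons x xs ih =>
    intro g v hv
    simp only [pvSel] at hv
    by_cases h : g.all (fun m => ! pvBlocks dm m x) = true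
    · simp only [h, if_pos] at hv
      rcases List.mem_cons.mp hv with rfl | hv'
      · exact h
      · have h2 := ih (g ++ [x]) v hv'
        simp only [List.all_append, Bool.and_eq_true] at h2
        exact h2.1
    · simp only [h, if_neg, Bool.not_eq_true] at hv
      exact ih g v hv

theorem pvSel_rej_len (dm : List (Int × List Int)) :
    ∀ (xs g : _), (pvSel dm g xs).2.length ≤ xs.length := by
  intro xs
  induction xs with
  | nil => intro g; simp [pvSel]
  | cons x xs ih =>
    intro g
    simp only [pvSel]
    by_cases h : g.all (fun m => ! pvBlocks dm m x) = true
    · simp only [h, if_pos]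
      exact Nat.le_succ_of_le (ih _)
    · simp only [h, if_neg, Bool.not_eq_true]
      simpa using Nat.succ_le_succ (ih g)

theorem pvRemove_cons_of_ne {x v : List (String × Int)} (h : x ≠ v)
    (xs : List (List (String × Int))) : pvRemove (x :: xs) v = x :: pvRemove xs v := by
  unfold pvRemove
  rw [PySem.List.remove?_cons_of_ne xs h]
  cases PySem.List.remove? xs v <;> simp

theorem pvFoldRemove_cons {x : List (String × Int)} :
    ∀ (vs xs : List (List (String × Int))), x ∉ vs →
      vs.foldl pvRemove (x :: xs) = x :: vs.foldl pvRemove xs := by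
  intro vs
  induction vs with
  | nil => intro xs _; rfl
  | cons v vs ih =>
    intro xs hx
    have hne : x ≠ v := fun h => hx (h ▸ List.mem_cons_self)
    simp only [List.foldl_cons, pvRemove_cons_of_ne hne]
    exact ih _ (fun h => hx (List.mem_cons_of_mem _ h))

theorem pvSel_remove (dm : List (Int × List Int)) :
    ∀ (xs g : _), (pvSel dm g xs).1.foldl pvRemove xs = (pvSel dm g xs).2 := by
  intro xs
  induction xs with
  | nil => intro g; simp [pvSel]
  | cons x xs ih =>
    intro g
    simp only [pvSel]
    by_cases h : g.all (fun m => ! pvBlocks dm m x) = true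
    · simp only [h, if_pos, List.foldl_cons]
      have : pvRemove (x :: xs) x = xs := by
        unfold pvRemove; simp
      rw [this]
      exact ih (g ++ [x])
    · simp only [h, if_neg, Bool.not_eq_true]
      have hx : x ∉ (pvSel dm g xs).1 := by
        intro hmem
        exact h (pvSel_mem dm xs g x hmem)
      rw [pvFoldRemove_cons _ _ hx, ih g]

theorem pvPlace_bridge (dm : List (Int × List Int)) :
    ∀ (xs g : _) (gs : List (List (List (String × Int)))),
      xs.foldl (pvPlace dm) (g :: gs) =
        (g ++ (pvSel dm g xs).1) :: (pvSel dm g xs).2.foldl (pvPlace dm) gs := by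
  intro xs
  induction xs with
  | nil => intro g gs; simp [pvSel]
  | cons x xs ih =>
    intro g gs
    simp only [List.foldl_cons, pvPlace, pvSel]
    by_cases h : g.all (fun m => ! pvBlocks dm m x) = true
    · simp only [h, if_pos]
      rw [ih (g ++ [x]) gs]
      simp
    · simp only [h, if_neg, Bool.not_eq_true]
      rw [ih g (pvPlace dm gs x)]
      simp

theorem pvLoopA_eq (dm : List (Int × List Int)) :
    ∀ (n : Nat) (acc : List (List (List (String × Int)))) (rem : List (List (String × Int))),
      rem.length ≤ n →
      pvLoopA dm n acc rem = acc ++ rem.foldl (pvPlace dm) [] := by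
  intro n
  induction n with
  | zero =>
    intro acc rem h
    have : rem = [] := List.eq_nil_of_length_eq_zero (Nat.le_zero.mp h)
    subst this; simp [pvLoopA]
  | succ n ih =>
    intro acc rem h
    cases rem with
    | nil => simp [pvLoopA]
    | cons x xs =>
      simp only [pvLoopA, List.isEmpty_cons, Bool.false_eq_true, if_false]
      rw [pvPassA_foldl dm (x :: xs) [] []]
      simp only [List.nil_append]
      have hsel : pvSel dm [] (x :: xs)
          = (x :: (pvSel dm [x] xs).1, (pvSel dm [x] xs).2) := by
        simp [pvSel]
      rw [hsel]
      simp only [List.isEmpty_cons, Bool.false_eq_true, if_false]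
      have hrem : (x :: (pvSel dm [x] xs).1).foldl pvRemove (x :: xs)
          = (pvSel dm [x] xs).2 := by
        have := pvSel_remove dm (x :: xs) []
        rwa [hsel] at this
      rw [hrem]
      have hlen : (pvSel dm [x] xs).2.length ≤ n := by
        have := pvSel_rej_len dm xs [x]
        simpa using Nat.le_trans this (Nat.lt_succ_iff.mp (by simpa using h))
      rw [ih _ _ hlen]
      have hB : (x :: xs).foldl (pvPlace dm) []
          = (x :: (pvSel dm [x] xs).1) :: (pvSel dm [x] xs).2.foldl (pvPlace dm) [] := by
        simp only [List.foldl_cons, pvPlace]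
        rw [pvPlace_bridge dm xs [x] []]
        simp
      rw [hB]
      simp

-- ===== VERDICT (by name: the statement is the Claim_ definition above) =====
theorem find_parallel_groups_spec : Claim_equal_find_parallel_groups := by
  intro issues dm _
  unfold Spec_find_parallel_groups find_parallel_groups find_parallel_groups_alt
  rw [pvLoopA_eq dm issues.length [] issues (Nat.le_refl _)]
  simp
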